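-- pv_equiv track=rewrite | github.com/sednabcn/simleng_ai | simleng_ai/tests/test_shuffle_subsets.py | order_mode
-- ===== SOURCE A (Python) =====
-- def order_mode(data, tsearch):
--     from collections import OrderedDict
--
--     order = OrderedDict()
--
--     list_base = data
--     list_search = tsearch
--     if not isinstance(data, list):
--         list_base = list(data)
--     if not isinstance(tsearch, list):
--         list_search = []
--         for item in tsearch:
--             list_item = item
--             if not (isinstance(item, list)):
--                 list_item = list(item)
--             list_search.append(list_item)
--
--     for item in list_base:
--         order[item] = list_base.index(item)
--
--     f_order = lambda x: order[x]
--
--     order_search = list(map(f_order, list_search))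
--
--     if sorted(order_search) != order_search:
--         return False
--     else:
--         return True
-- ===== SOURCE B (Python) =====
-- def order_mode(data, tsearch):
--     # Every search item must occur in data (same KeyError contract as the lookup-based original).
--     for x in tsearch:
--         if x not in data:
--             raise KeyError(x)
--
--     # Decide each adjacent pair of tsearch by a "race" in data: the earlier of the
--     # two to appear wins. No first-index map, no sort.
--     def comes_no_later(a, b):
--         for z in data:
--             if z == a:
--                 return True
--             if z == b:
--                 return False
--         return False
--     return all(comes_no_later(a, b) for a, b in zip(tsearch, tsearch[1:]))
-- ===== Notes on version B (the rewrite author's own statement) =====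
-- stated objective: alternative
-- what changed: Drops A's first-occurrence index dictionary and sorted() comparison entirely; B decides each adjacent pair of tsearch by a direct race scan of data (whichever of the two elements appears first wins), so no index values are ever computed or compared, and keeps A's KeyError contract by validating the search items first.
import Mathlib
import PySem

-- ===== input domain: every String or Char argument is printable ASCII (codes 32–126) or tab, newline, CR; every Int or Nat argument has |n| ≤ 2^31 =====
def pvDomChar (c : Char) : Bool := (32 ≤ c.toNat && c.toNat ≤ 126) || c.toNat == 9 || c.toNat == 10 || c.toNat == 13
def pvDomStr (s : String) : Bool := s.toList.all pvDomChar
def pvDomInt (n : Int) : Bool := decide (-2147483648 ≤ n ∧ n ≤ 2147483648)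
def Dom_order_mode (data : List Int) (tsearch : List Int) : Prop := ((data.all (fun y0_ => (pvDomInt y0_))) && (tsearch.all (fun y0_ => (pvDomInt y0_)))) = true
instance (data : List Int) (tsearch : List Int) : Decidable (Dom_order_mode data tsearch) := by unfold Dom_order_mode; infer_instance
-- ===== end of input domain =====

-- B drops A's first-index dictionary and sorted() comparison; it decides each adjacent
-- pair of tsearch by a direct race scan of data (whoever appears first wins); B keeps
-- A's KeyError contract for search items absent from data (outside Pre_).

-- ===== PORT A =====
-- for item in list_base: order[item] = list_base.index(item)
-- list.index raises ValueError only for item ∉ data (cannot happen: item ∈ data), so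
-- .getD 0 is exact; order[x] raises KeyError when x ∉ data — excluded by Pre_, so
-- .getD 0 is exact inside Pre_.
def order_mode (data : List Int) (tsearch : List Int) : Bool :=
  let order : PySem.Dict Int Int :=
    data.foldl (fun d item => d.insert item (((PySem.List.index? data item).getD 0 : Nat) : Int)) PySem.Dict.empty
  let order_search : List Int := tsearch.map (fun x => (order.get? x).getD 0)
  if PySem.List.sorted order_search (fun x => x) false ≠ order_search then false else true

-- ===== PORT B =====
-- Source B's leading validation loop ('if x not in data: raise KeyError(x)') raises exactly
-- when some tsearch element is absent from data — outside Pre_ — and is a no-op inside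
-- Pre_, so it contributes nothing to the ported value.
-- comes_no_later(a, b): the for-loop race over data
def omRace (data : List Int) (a b : Int) : Bool :=
  match data with
  | [] => false
  | z :: rest => if z = a then true else if z = b then false else omRace rest a b

def order_mode_alt (data : List Int) (tsearch : List Int) : Bool :=
  (tsearch.zip tsearch.tail).all (fun p => omRace data p.1 p.2)

-- ===== PRECONDITION & SPEC =====
-- Pre_ excludes exactly the inputs where a tsearch element is absent from data:
-- there A raises KeyError.
def Pre_order_mode (data : List Int) (tsearch : List Int) : Prop :=
  ∀ x ∈ tsearch, x ∈ data
instance (data : List Int) (tsearch : List Int) : Decidable (Pre_order_mode data tsearch) := by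
  unfold Pre_order_mode; infer_instance
def pvWitness_order_mode : List Int × List Int := ([3, 1, 3, 2], [3, 1, 2, 1])
def Spec_order_mode (data : List Int) (tsearch : List Int) (out : Bool) : Prop := out = order_mode_alt data tsearch
instance (data : List Int) (tsearch : List Int) (out : Bool) : Decidable (Spec_order_mode data tsearch out) := by unfold Spec_order_mode; infer_instance

-- ===== CLAIM (what is proved, stated in full; the proofs are below) =====
def Claim_equal_order_mode : Prop := ∀ (data : List Int) (tsearch : List Int), Dom_order_mode data tsearch → Pre_order_mode data tsearch → Spec_order_mode data tsearch (order_mode data tsearch)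

-- ===== LEMMAS AND PROOFS =====

-- A's dict fold: every key of `l` (⊆ data) holds data's first-occurrence index.
theorem getA (data l : List Int) (d0 : PySem.Dict Int Int) (x : Int)
    (hl : ∀ y ∈ l, y ∈ data) :
    (l.foldl (fun d item => d.insert item (((PySem.List.index? data item).getD 0 : Nat) : Int)) d0).get? x
      = if x ∈ l then ((PySem.List.index? data x).map (fun n => (n : Int))) else d0.get? x := by
  induction l generalizing d0 with
  | nil => simp
  | cons a t ih =>
    have ha : a ∈ data := hl a (by simp)
    have ht : ∀ y ∈ t, y ∈ data := fun y hy => hl y (by simp [hy])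
    simp only [List.foldl_cons, ih _ ht]
    by_cases hxt : x ∈ t
    · simp [hxt]
    · by_cases hxa : x = a
      · subst hxa
        cases hix : PySem.List.index? data x with
        | none =>
          rw [PySem.List.index?_eq_none_iff] at hix; exact absurd ha hix
        | some k => simp [hxt, PySem.Dict.get?_insert_self]
      · simp [hxt, hxa, PySem.Dict.get?_insert_of_ne _ _ hxa]

-- the race decides exactly "a's first occurrence is no later than b's"
theorem race_iff (data : List Int) (a b : Int) (ha : a ∈ data) (hb : b ∈ data) :
    omRace data a b = true ↔
      (PySem.List.index? data a).getD 0 ≤ (PySem.List.index? data b).getD 0 := by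
  induction data with
  | nil => simp at ha
  | cons z t ih =>
    by_cases hza : z = a
    · subst hza
      rw [PySem.List.index?_cons_self]
      simp [omRace]
    · by_cases hzb : z = b
      · subst hzb
        have hat : a ∈ t := by
          rcases List.mem_cons.1 ha with h | h
          · exact absurd h.symm hza
          · exact h
        rw [PySem.List.index?_cons_self, PySem.List.index?_cons_of_ne _ hza]
        have hs := (PySem.List.index?_isSome_iff t a).2 hat
        cases hk : PySem.List.index? t a with
        | none => rw [hk] at hs; simp at hs
        | some k =>
          simp only [Option.map_some, Option.getD_some]
          constructor
          · intro hr; simp [omRace, hza] at hr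
          · intro hr; omega
      · have hat : a ∈ t := by
          rcases List.mem_cons.1 ha with h | h
          · exact absurd h.symm hza
          · exact h
        have hbt : b ∈ t := by
          rcases List.mem_cons.1 hb with h | h
          · exact absurd h.symm hzb
          · exact h
        rw [PySem.List.index?_cons_of_ne _ hza, PySem.List.index?_cons_of_ne _ hzb]
        have ha' := (PySem.List.index?_isSome_iff t a).2 hat
        have hb' := (PySem.List.index?_isSome_iff t b).2 hbt
        cases hka : PySem.List.index? t a with
        | none => rw [hka] at ha'; simp at ha'
        | some ka =>
          cases hkb : PySem.List.index? t b with
          | none => rw [hkb] at hb'; simp at hb'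
          | some kb =>
            have hih := ih hat hbt
            rw [hka, hkb] at hih
            simp only [omRace, hza, hzb, if_false]
            simp only [Option.map_some, Option.getD_some] at hih ⊢
            rw [hih]
            omega

-- the all-over-adjacent-pairs check equals Pairwise of the first-index order
theorem all_zip_iff (data : List Int) (ts : List Int) (h : ∀ x ∈ ts, x ∈ data) :
    ((ts.zip ts.tail).all (fun p => omRace data p.1 p.2) = true) ↔
      ts.Pairwise (fun a b =>
        (PySem.List.index? data a).getD 0 ≤ (PySem.List.index? data b).getD 0) := by
  induction ts with
  | nil => simp
  | cons a t ih =>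
    have hat : a ∈ data := h a (by simp)
    have ht : ∀ x ∈ t, x ∈ data := fun x hx => h x (by simp [hx])
    cases t with
    | nil => simp
    | cons b u =>
      have hbt : b ∈ data := ht b (by simp)
      simp only [List.tail_cons] at ih ⊢
      simp only [List.zip_cons_cons, List.all_cons, Bool.and_eq_true]
      rw [race_iff data a b hat hbt, ih ht]
      constructor
      · rintro ⟨hab, hrest⟩
        refine List.Pairwise.cons ?_ hrest
        intro y hy
        rcases List.mem_cons.1 hy with rfl | hyu
        · exact hab
        · exact le_trans hab ((List.pairwise_cons.1 hrest).1 y hyu)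
      · intro hp
        rcases List.pairwise_cons.1 hp with ⟨hall, htl⟩
        exact ⟨hall b (by simp), htl⟩

-- ===== VERDICT (by name: the statement is the Claim_ definition above) =====
theorem order_mode_spec : Claim_equal_order_mode := by
  intro data tsearch _ hpre
  unfold Spec_order_mode order_mode order_mode_alt
  have hmap : tsearch.map (fun x =>
        ((data.foldl (fun d item => d.insert item (((PySem.List.index? data item).getD 0 : Nat) : Int)) PySem.Dict.empty).get? x).getD 0)
      = tsearch.map (fun x => (((PySem.List.index? data x).getD 0 : Nat) : Int)) := by
    apply List.map_congr_left
    intro x hx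
    rw [getA data data PySem.Dict.empty x (fun y hy => hy)]
    have hxd := hpre x hx
    have := (PySem.List.index?_isSome_iff data x).2 hxd
    cases hk : PySem.List.index? data x with
    | none => rw [hk] at this; simp at this
    | some k => simp [hxd]
  simp only [hmap]
  set idxs := tsearch.map (fun x => (((PySem.List.index? data x).getD 0 : Nat) : Int)) with hidxs
  have hpw_iff : idxs.Pairwise (· ≤ ·) ↔
      tsearch.Pairwise (fun a b =>
        (PySem.List.index? data a).getD 0 ≤ (PySem.List.index? data b).getD 0) := by
    rw [hidxs, List.pairwise_map]
    constructor <;> intro hp <;> refine hp.imp ?_ <;> intro a b hab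
    · exact_mod_cast hab
    · exact_mod_cast hab
  have hB := all_zip_iff data tsearch hpre
  by_cases h : PySem.List.sorted idxs (fun x => x) false = idxs
  · have hp : idxs.Pairwise (· ≤ ·) := by
      have := PySem.List.sorted_pairwise idxs (fun x => x)
      rwa [h] at this
    have htrue : ((tsearch.zip tsearch.tail).all (fun p => omRace data p.1 p.2)) = true :=
      hB.2 (hpw_iff.1 hp)
    simp [h, htrue]
  · have hnp : ¬ idxs.Pairwise (· ≤ ·) := fun hp =>
      h (PySem.List.sorted_eq_self_of_pairwise idxs (fun x => x) hp)
    have hfalse : ((tsearch.zip tsearch.tail).all (fun p => omRace data p.1 p.2)) = false := by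
      cases h' : ((tsearch.zip tsearch.tail).all (fun p => omRace data p.1 p.2)) with
      | false => rfl
      | true => exact absurd (hpw_iff.2 (hB.1 h')) hnp
    simp [h, hfalse]
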